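-- pv_equiv track=rewrite | github.com/cafaray/atco.de-fights | evenNumbersBeforeFixed.py | evenNumbersBeforeFixed
-- ===== SOURCE A (Python) =====
-- def evenNumbersBeforeFixed(sequence, fixedElement):
--     if fixedElement not in sequence: return -1
--     res = []
--     for x in range(len(sequence)):
--         if sequence[x] == fixedElement: break
--         if sequence[x]%2==0:
--             res += [sequence[x]]
--     return len(res)
-- ===== SOURCE B (Python) =====
-- def evenNumbersBeforeFixed(sequence, fixedElement):
--     if fixedElement not in sequence:
--         return -1
--     idx = 0
--     while sequence[idx] != fixedElement:
--         idx += 1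
--     return sum(1 for x in sequence[:idx] if x % 2 == 0)
-- ===== Notes on version B (the rewrite author's own statement) =====
-- stated objective: simpler
-- what changed: Instead of building an intermediate list of even elements inside a break-driven loop, B first finds the index of the first occurrence with a while-scan and then counts evens over the prefix slice in a separate pass.
import Mathlib
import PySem

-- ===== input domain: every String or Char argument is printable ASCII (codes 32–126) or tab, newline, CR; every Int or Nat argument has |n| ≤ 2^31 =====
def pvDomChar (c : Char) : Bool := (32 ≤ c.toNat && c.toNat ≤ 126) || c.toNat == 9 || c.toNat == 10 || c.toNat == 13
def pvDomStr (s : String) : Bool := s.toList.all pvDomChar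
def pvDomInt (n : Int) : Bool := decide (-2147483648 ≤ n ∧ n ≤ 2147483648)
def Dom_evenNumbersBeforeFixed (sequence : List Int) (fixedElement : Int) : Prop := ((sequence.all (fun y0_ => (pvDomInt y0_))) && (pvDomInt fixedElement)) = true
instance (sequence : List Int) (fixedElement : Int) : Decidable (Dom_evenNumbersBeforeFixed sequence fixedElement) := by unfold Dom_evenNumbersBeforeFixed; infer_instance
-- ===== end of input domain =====

-- B replaces A's break-driven loop that accumulates a list of evens with an
-- index search for the first occurrence followed by a separate counting pass over the prefix.
-- ===== PORT A =====
-- A's loop: walk the remaining elements, break on fixedElement, append evens to res.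
def evenNumbersBeforeFixed_loop (rest : List Int) (fixedElement : Int) (res : List Int) : List Int :=
  match rest with
  | [] => res
  | y :: ys =>
    if y == fixedElement then res
    else if PySem.Int.mod y 2 == 0 then evenNumbersBeforeFixed_loop ys fixedElement (res ++ [y])
    else evenNumbersBeforeFixed_loop ys fixedElement res

def evenNumbersBeforeFixed (sequence : List Int) (fixedElement : Int) : Int :=
  if ¬ sequence.contains fixedElement then -1
  else ((evenNumbersBeforeFixed_loop sequence fixedElement []).length : Int)

-- ===== PORT B =====
-- B's while loop: index of the first element equal to fixedElement (precondition: it occurs).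
def evenNumbersBeforeFixed_idx (rest : List Int) (fixedElement : Int) : Nat :=
  match rest with
  | [] => 0
  | y :: ys => if y != fixedElement then evenNumbersBeforeFixed_idx ys fixedElement + 1 else 0

def evenNumbersBeforeFixed_alt (sequence : List Int) (fixedElement : Int) : Int :=
  if ¬ sequence.contains fixedElement then -1
  else
    (sequence.take (evenNumbersBeforeFixed_idx sequence fixedElement)).foldl
      (fun acc x => if PySem.Int.mod x 2 == 0 then acc + 1 else acc) (0 : Int)

-- ===== PRECONDITION & SPEC =====
def Spec_evenNumbersBeforeFixed (sequence : List Int) (fixedElement : Int) (out : Int) : Prop := out = evenNumbersBeforeFixed_alt sequence fixedElement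
instance (sequence : List Int) (fixedElement : Int) (out : Int) : Decidable (Spec_evenNumbersBeforeFixed sequence fixedElement out) := by unfold Spec_evenNumbersBeforeFixed; infer_instance

-- ===== CLAIM (what is proved, stated in full; the proofs are below) =====
def Claim_equal_evenNumbersBeforeFixed : Prop := ∀ (sequence : List Int) (fixedElement : Int), Dom_evenNumbersBeforeFixed sequence fixedElement → Spec_evenNumbersBeforeFixed sequence fixedElement (evenNumbersBeforeFixed sequence fixedElement)

-- ===== LEMMAS AND PROOFS =====

-- B's fold with a general initial accumulator splits off the start value.
lemma alt_fold_init (l : List Int) (n : Int) :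
    l.foldl (fun acc x => if PySem.Int.mod x 2 == 0 then acc + 1 else acc) n
      = n + l.foldl (fun acc x => if PySem.Int.mod x 2 == 0 then acc + 1 else acc) 0 := by
  induction l generalizing n with
  | nil => simp
  | cons y ys ih =>
    simp only [List.foldl_cons]
    rw [ih, ih (if PySem.Int.mod y 2 == 0 then (0:Int) + 1 else 0)]
    split_ifs <;> ring

-- A's loop length equals B's prefix count, for any starting res.
lemma loop_eq_count (l : List Int) (f : Int) (res : List Int) :
    ((evenNumbersBeforeFixed_loop l f res).length : Int)
      = (res.length : Int) +
        (l.take (evenNumbersBeforeFixed_idx l f)).foldl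
          (fun acc x => if PySem.Int.mod x 2 == 0 then acc + 1 else acc) 0 := by
  induction l generalizing res with
  | nil => simp [evenNumbersBeforeFixed_loop, evenNumbersBeforeFixed_idx]
  | cons y ys ih =>
    by_cases hy : y = f
    · simp [evenNumbersBeforeFixed_loop, evenNumbersBeforeFixed_idx, hy]
    · have hloop : evenNumbersBeforeFixed_loop (y :: ys) f res
          = if PySem.Int.mod y 2 == 0 then evenNumbersBeforeFixed_loop ys f (res ++ [y])
            else evenNumbersBeforeFixed_loop ys f res := by
        simp [evenNumbersBeforeFixed_loop, hy]
      have hidx : evenNumbersBeforeFixed_idx (y :: ys) f = evenNumbersBeforeFixed_idx ys f + 1 := by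
        simp [evenNumbersBeforeFixed_idx, hy]
      rw [hloop, hidx, List.take_succ_cons, List.foldl_cons, alt_fold_init]
      split_ifs with he
      · rw [ih]
        push_cast [List.length_append]
        simp only [List.length_cons, List.length_nil]
        ring
      · rw [ih]
        simp

-- ===== VERDICT (by name: the statement is the Claim_ definition above) =====
theorem evenNumbersBeforeFixed_spec : Claim_equal_evenNumbersBeforeFixed := by
  intro sequence fixedElement _
  unfold Spec_evenNumbersBeforeFixed evenNumbersBeforeFixed evenNumbersBeforeFixed_alt
  split_ifs with h
  · rw [loop_eq_count]
    simp
  · rfl
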